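-- pv_equiv track=rewrite | github.com/ShashankSinha98/Striver-A2Z-DSA-Sheet | Notes/test.py | make_sweets
-- ===== SOURCE A (Python) =====
-- from typing import List, Tuple
-- from collections import Counter
--
-- def make_sweets(time: List[int], sweetness: List[int], daytime: List[int]) -> Tuple[int, int]:
--     n = len(time)
--     sweets = [(sweetness[i], time[i]) for i in range(n)]
--
--     # Sort sweets using the custom comparator
--     sweets.sort(key=lambda x: (-x[0], x[1]))
--
--     # Use a Counter to track available days
--     available_days = Counter(daytime)
--
--     cnt_sweets = 0
--     total_sweetness = 0
--
--     for sweet in sweets: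
--         sweetness_value = sweet[0]
--         time_required = sweet[1]
--
--         # Find the first available day with enough time
--         suitable_days = [day for day in available_days if day >= time_required]
--         if suitable_days:
--             day_to_use = min(suitable_days)
--
--             # Decrease the count of that available day
--             available_days[day_to_use] -= 1
--             if available_days[day_to_use] == 0:
--                 del available_days[day_to_use]
--
--             cnt_sweets += 1
--             total_sweetness += sweetness_value
--
--     return cnt_sweets, total_sweetness
-- ===== SOURCE B (Python) =====
-- from typing import List, Tuple
-- from bisect import bisect_left
--
-- def make_sweets(time: List[int], sweetness: List[int], daytime: List[int]) -> Tuple[int, int]: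
--     n = len(time)
--     sweets = sorted(((sweetness[i], time[i]) for i in range(n)),
--                     key=lambda x: (-x[0], x[1]))
--     days = sorted(daytime)  # multiset of available days, kept sorted
--     cnt_sweets = 0
--     total_sweetness = 0
--     for sweetness_value, time_required in sweets:
--         i = bisect_left(days, time_required)
--         if i < len(days):
--             days.pop(i)
--             cnt_sweets += 1
--             total_sweetness += sweetness_value
--     return cnt_sweets, total_sweetness
-- ===== Notes on version B (the rewrite author's own statement) =====
-- stated objective: faster
-- what changed: Replaces A's per-sweet Python-level scan over all Counter keys plus min() with a sorted multiset of days queried by bisect_left for the smallest day >= time_required and removed in place.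
import Mathlib
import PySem

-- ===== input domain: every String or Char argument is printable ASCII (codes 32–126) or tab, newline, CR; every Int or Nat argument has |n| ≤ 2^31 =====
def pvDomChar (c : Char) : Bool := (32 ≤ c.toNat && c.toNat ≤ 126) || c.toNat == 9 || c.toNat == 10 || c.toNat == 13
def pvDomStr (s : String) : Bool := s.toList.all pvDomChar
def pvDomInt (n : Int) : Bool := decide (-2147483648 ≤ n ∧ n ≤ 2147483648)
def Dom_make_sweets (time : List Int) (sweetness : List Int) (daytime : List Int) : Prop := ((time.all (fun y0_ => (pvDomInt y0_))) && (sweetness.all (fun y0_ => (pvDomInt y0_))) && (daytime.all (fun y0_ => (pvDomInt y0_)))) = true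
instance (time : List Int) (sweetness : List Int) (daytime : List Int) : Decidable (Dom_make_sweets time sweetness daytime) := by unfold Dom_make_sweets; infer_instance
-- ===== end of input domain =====

-- B keeps the available days as a sorted multiset and takes the smallest day ≥ time_required
-- by binary search, instead of A's per-sweet scan over all Counter keys followed by min().


-- ===== PORT A =====
-- loop body of A's 'for sweet in sweets' (state = (available_days, cnt_sweets, total_sweetness))
def mkSweetsStepA (st : PySem.Dict Int Int × Int × Int) (sweet : Int × Int) :
    PySem.Dict Int Int × Int × Int :=
  let sweetness_value := sweet.1
  let time_required := sweet.2
  let suitable_days := st.1.keys.filter (fun day => decide (day ≥ time_required))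
  match PySem.List.min? suitable_days (fun d => d) with
  | none => st
  | some day_to_use =>
    let d1 := st.1.insert day_to_use (st.1.getD day_to_use 0 - 1)
    let d2 := if d1.getD day_to_use 0 == 0 then d1.erase day_to_use else d1
    (d2, st.2.1 + 1, st.2.2 + sweetness_value)

def make_sweets (time : List Int) (sweetness : List Int) (daytime : List Int) : Int × Int :=
  let n : Int := PySem.List.len time
  let sweets : List (Int × Int) :=
    (PySem.List.pyRange 0 n 1).map (fun i =>
      (PySem.List.pyGetD sweetness i 0, PySem.List.pyGetD time i 0))
  let sweets := PySem.List.sorted2 sweets (fun x => -x.1) (fun x => x.2)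
  let available_days : PySem.Dict Int Int := PySem.Dict.counter daytime
  let res := sweets.foldl mkSweetsStepA (available_days, 0, 0)
  (res.2.1, res.2.2)

-- ===== PORT B =====
-- loop body of B's 'for sweetness_value, time_required in sweets' (state = (days, cnt, total))
def mkSweetsStepB (st : List Int × Int × Int) (sweet : Int × Int) :
    List Int × Int × Int :=
  let i := PySem.List.bisectLeft st.1 sweet.2
  if i < st.1.length then
    (st.1.eraseIdx i, st.2.1 + 1, st.2.2 + sweet.1)
  else st

def make_sweets_alt (time : List Int) (sweetness : List Int) (daytime : List Int) : Int × Int :=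
  let n : Int := PySem.List.len time
  let sweets := PySem.List.sorted2
    ((PySem.List.pyRange 0 n 1).map (fun i =>
      (PySem.List.pyGetD sweetness i 0, PySem.List.pyGetD time i 0)))
    (fun x => -x.1) (fun x => x.2)
  let days := PySem.List.sorted daytime (fun x => x)
  let res := sweets.foldl mkSweetsStepB (days, 0, 0)
  (res.2.1, res.2.2)

-- ===== PRECONDITION & SPEC =====
-- A (and B) raise IndexError reading sweetness[i] for i < len(time) when sweetness is shorter.
def Pre_make_sweets (time : List Int) (sweetness : List Int) (daytime : List Int) : Prop :=
  time.length ≤ sweetness.length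
instance (time : List Int) (sweetness : List Int) (daytime : List Int) : Decidable (Pre_make_sweets time sweetness daytime) := by unfold Pre_make_sweets; infer_instance
def pvWitness_make_sweets : List Int × List Int × List Int := ([1, 2], [5, 3], [2, 1, 2])

def Spec_make_sweets (time : List Int) (sweetness : List Int) (daytime : List Int) (out : Int × Int) : Prop := out = make_sweets_alt time sweetness daytime
instance (time : List Int) (sweetness : List Int) (daytime : List Int) (out : Int × Int) : Decidable (Spec_make_sweets time sweetness daytime out) := by unfold Spec_make_sweets; infer_instance

-- ===== CLAIM (what is proved, stated in full; the proofs are below) =====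
def Claim_equal_make_sweets : Prop := ∀ (time : List Int) (sweetness : List Int) (daytime : List Int), Dom_make_sweets time sweetness daytime → Pre_make_sweets time sweetness daytime → Spec_make_sweets time sweetness daytime (make_sweets time sweetness daytime)

-- ===== LEMMAS AND PROOFS =====

-- Dict.erase facts (not in the PySem book): lookup and key membership after 'del d[m]'
theorem dict_get?_erase (d : PySem.Dict Int Int) (k m : Int) :
    (d.erase m).get? k = if k = m then none else d.get? k := by
  rcases d with ⟨items⟩
  by_cases h : k = m
  · subst h
    have hfind : List.find? (fun p : Int × Int => p.1 == k) (items.filter (fun p => !p.1 == k)) = none := by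
      rw [List.find?_eq_none]
      intro p hp
      simp only [List.mem_filter] at hp
      simpa using hp.2
    simp [PySem.Dict.erase, PySem.Dict.get?, hfind]
  · simp only [PySem.Dict.erase, PySem.Dict.get?, if_neg h]
    congr 1
    induction items with
    | nil => rfl
    | cons p rest ih =>
      simp only [List.filter_cons, List.find?_cons]
      have hmk : (m == k) = false := by simp [Ne.symm h]
      have hkm : (k == m) = false := by simp [h]
      by_cases hp : p.1 = m
      · have hpk : (p.1 == k) = false := by simp [hp, Ne.symm h]
        simp [hp, ih, hmk]
      · by_cases hk2 : p.1 = k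
        · simp [hk2, hkm]
        · have hpk : (p.1 == k) = false := by simp [hk2]
          simp [hp, hpk, ih]

theorem dict_getD_erase (d : PySem.Dict Int Int) (k m : Int) :
    (d.erase m).getD k 0 = if k = m then 0 else d.getD k 0 := by
  rw [PySem.Dict.getD_eq_get?_getD, dict_get?_erase]
  by_cases h : k = m
  · simp [h]
  · simp [h, PySem.Dict.getD_eq_get?_getD]

theorem dict_mem_keys_erase (d : PySem.Dict Int Int) (k m : Int) :
    k ∈ (d.erase m).keys ↔ k ∈ d.keys ∧ k ≠ m := by
  rcases d with ⟨items⟩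
  simp only [PySem.Dict.erase, PySem.Dict.keys, List.mem_map, List.mem_filter]
  constructor
  · rintro ⟨p, ⟨hp, hne⟩, rfl⟩
    exact ⟨⟨p, hp, rfl⟩, by simpa using hne⟩
  · rintro ⟨⟨p, hp, rfl⟩, hne⟩
    exact ⟨p, ⟨hp, by simpa using hne⟩, rfl⟩

-- removing index i from a list: the multiset loses one copy of l[i]
theorem count_eraseIdx_getElem (l : List Int) (i : Nat) (hi : i < l.length) (k : Int) :
    l.count k = (l.eraseIdx i).count k + (if k = l[i] then 1 else 0) := by
  have hdrop : l.drop i = l[i] :: l.drop (i+1) := List.drop_eq_getElem_cons hi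
  have hsplit : l.count k = (l.take i).count k + (l[i] :: l.drop (i+1)).count k := by
    conv_lhs => rw [← List.take_append_drop i l, hdrop]
    exact List.count_append ..
  rw [hsplit, List.eraseIdx_eq_take_drop_succ, List.count_append, List.count_cons]
  by_cases h : k = l[i] <;> simp [h] <;> omega

-- the loop invariant: the Counter c and the sorted list l describe the same multiset of days
def DaysInv (c : PySem.Dict Int Int) (l : List Int) : Prop :=
  l.Pairwise (· ≤ ·) ∧ (∀ k, c.getD k 0 = (l.count k : Int)) ∧
    (∀ k, k ∈ c.keys ↔ 0 < l.count k)

theorem step_inv (c : PySem.Dict Int Int) (l : List Int) (sv tr : Int)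
    (h : DaysInv c l) (cnt tot : Int) :
    (mkSweetsStepA (c, cnt, tot) (sv, tr)).2 = (mkSweetsStepB (l, cnt, tot) (sv, tr)).2 ∧
      DaysInv (mkSweetsStepA (c, cnt, tot) (sv, tr)).1 (mkSweetsStepB (l, cnt, tot) (sv, tr)).1 := by
  obtain ⟨hs, hc, hk⟩ := h
  obtain ⟨hlen, hlt, hge⟩ := PySem.List.bisectLeft_spec l tr hs
  set i := PySem.List.bisectLeft l tr with hidef
  have hmem_iff : ∀ x, x ∈ c.keys ↔ x ∈ l := by
    intro x; rw [hk x, List.count_pos_iff]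
  by_cases hi : i < l.length
  · -- a suitable day exists; both sides pick m = l[i], the least day ≥ tr
    have hm : l[i] ∈ l := List.getElem_mem hi
    have hmge : tr ≤ l[i] := hge i hi le_rfl
    have hsorted_mono : ∀ (p q : Nat) (hp : p < l.length) (hq : q < l.length),
        p ≤ q → l[p] ≤ l[q] := by
      intro p q hp hq hpq
      rcases Nat.lt_or_eq_of_le hpq with h' | h'
      · exact (List.pairwise_iff_getElem.mp hs) p q hp hq h'
      · subst h'; exact le_rfl
    have hmin_all : ∀ x ∈ c.keys.filter (fun day => decide (day ≥ tr)), l[i] ≤ x := by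
      intro x hx
      rw [List.mem_filter] at hx
      obtain ⟨hxk, hxge⟩ := hx
      have hxl : x ∈ l := (hmem_iff x).mp hxk
      obtain ⟨j, hj, rfl⟩ := List.getElem_of_mem hxl
      by_cases hji : j < i
      · exact absurd (by simpa using hxge) (not_le.mpr (hlt j hj hji))
      · exact hsorted_mono i j hi hj (Nat.le_of_not_lt hji)
    have hmin_mem : l[i] ∈ c.keys.filter (fun day => decide (day ≥ tr)) := by
      rw [List.mem_filter]
      exact ⟨(hmem_iff _).mpr hm, by simpa using hmge⟩
    have hmin : PySem.List.min? (c.keys.filter (fun day => decide (day ≥ tr))) (fun d => d)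
        = some l[i] := by
      rcases hval : PySem.List.min? (c.keys.filter (fun day => decide (day ≥ tr))) (fun d => d)
        with _ | v
      · rw [(PySem.List.min?_eq_none_iff _ _).mp hval] at hmin_mem
        exact absurd hmin_mem List.not_mem_nil
      · have hv1 : v ∈ c.keys.filter (fun day => decide (day ≥ tr)) := PySem.List.min?_mem hval
        have hv2 : v ≤ l[i] := PySem.List.min?_isMin hval _ hmin_mem
        have hv3 : l[i] ≤ v := hmin_all v hv1
        rw [le_antisymm hv2 hv3]
    have hcm : 0 < l.count l[i] := List.count_pos_iff.mpr hm
    have hcnt : ∀ k, l.count k = (l.eraseIdx i).count k + (if k = l[i] then 1 else 0) :=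
      fun k => count_eraseIdx_getElem l i hi k
    have hs' : (l.eraseIdx i).Pairwise (· ≤ ·) := hs.sublist (List.eraseIdx_sublist l i)
    have h1 : ∀ k', (c.insert l[i] (c.getD l[i] 0 - 1)).getD k' 0
        = if k' = l[i] then (l.count l[i] : Int) - 1 else (l.count k' : Int) := by
      intro k'
      rw [PySem.Dict.getD_insert]
      by_cases h' : k' = l[i] <;> simp [h', hc]
    have hkeys1 : ∀ x, x ∈ (c.insert l[i] (c.getD l[i] 0 - 1)).keys ↔ x = l[i] ∨ x ∈ c.keys :=
      fun x => PySem.Dict.mem_keys_insert _ _ _ _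
    have hz_iff : ((c.insert l[i] (c.getD l[i] 0 - 1)).getD l[i] 0 == 0) = true ↔
        l.count l[i] = 1 := by
      rw [beq_iff_eq, h1 l[i], if_pos rfl]
      omega
    simp only [mkSweetsStepA, mkSweetsStepB, hmin, ← hidef, if_pos hi]
    refine ⟨trivial, hs', ?_, ?_⟩
    · -- counts agree after the update
      intro k
      by_cases hz : l.count l[i] = 1
      · rw [if_pos (hz_iff.mpr hz), dict_getD_erase]
        have := hcnt k
        by_cases h' : k = l[i]
        · subst h'; rw [if_pos rfl]; rw [if_pos rfl] at this; omega
        · rw [if_neg h', h1 k, if_neg h']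
          rw [if_neg h'] at this
          omega
      · rw [if_neg (fun hx => hz (hz_iff.mp hx)), h1 k]
        have := hcnt k
        by_cases h' : k = l[i]
        · subst h'; rw [if_pos rfl]; rw [if_pos rfl] at this; omega
        · rw [if_neg h']; rw [if_neg h'] at this; omega
    · -- key membership agrees after the update
      intro k
      have hck := hcnt k
      by_cases hz : l.count l[i] = 1
      · rw [if_pos (hz_iff.mpr hz), dict_mem_keys_erase, hkeys1, hk]
        by_cases h' : k = l[i]
        · subst h'
          rw [if_pos rfl] at hck
          constructor
          · rintro ⟨_, hne⟩; exact absurd rfl hne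
          · intro hpos; omega
        · rw [if_neg h'] at hck
          constructor
          · rintro ⟨hor | hor, _⟩
            · exact absurd hor h'
            · omega
          · intro hpos; exact ⟨Or.inr (by omega), h'⟩
      · rw [if_neg (fun hx => hz (hz_iff.mp hx)), hkeys1, hk]
        by_cases h' : k = l[i]
        · subst h'
          rw [if_pos rfl] at hck
          constructor
          · intro _; omega
          · intro _; exact Or.inl rfl
        · rw [if_neg h'] at hck
          constructor
          · rintro (hor | hor)
            · exact absurd hor h'
            · omega
          · intro hpos; exact Or.inr (by omega)
  · -- no suitable day: every day is < tr, so A's comprehension is empty too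
    have hall : ∀ x ∈ l, x < tr := by
      intro x hx
      obtain ⟨j, hj, rfl⟩ := List.getElem_of_mem hx
      exact hlt j hj (by omega)
    have hnil : c.keys.filter (fun day => decide (day ≥ tr)) = [] := by
      rw [List.eq_nil_iff_forall_not_mem]
      intro x hx
      rw [List.mem_filter] at hx
      have hxl : x ∈ l := (hmem_iff x).mp hx.1
      have := hall x hxl
      have := of_decide_eq_true hx.2
      omega
    have hminn : PySem.List.min? (c.keys.filter (fun day => decide (day ≥ tr))) (fun d => d)
        = none := by rw [hnil]; rfl
    simp only [mkSweetsStepA, mkSweetsStepB, hminn, ← hidef, if_neg hi]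
    exact ⟨trivial, hs, hc, hk⟩

theorem loop_eq (sw : List (Int × Int)) :
    ∀ (c : PySem.Dict Int Int) (l : List Int) (cnt tot : Int), DaysInv c l →
      (sw.foldl mkSweetsStepA (c, cnt, tot)).2 = (sw.foldl mkSweetsStepB (l, cnt, tot)).2 := by
  induction sw with
  | nil => intro c l cnt tot _; rfl
  | cons sweet rest ih =>
    intro c l cnt tot hinv
    obtain ⟨heq, hinv'⟩ := step_inv c l sweet.1 sweet.2 hinv cnt tot
    simp only [List.foldl_cons]
    have hA : mkSweetsStepA (c, cnt, tot) sweet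
        = ((mkSweetsStepA (c, cnt, tot) sweet).1, (mkSweetsStepA (c, cnt, tot) sweet).2) := rfl
    have hB : mkSweetsStepB (l, cnt, tot) sweet
        = ((mkSweetsStepB (l, cnt, tot) sweet).1, (mkSweetsStepB (l, cnt, tot) sweet).2) := rfl
    rw [hA, hB, ← heq]
    exact ih _ _ _ _ hinv'

theorem init_inv (daytime : List Int) :
    DaysInv (PySem.Dict.counter daytime) (PySem.List.sorted daytime (fun x => x)) := by
  have hperm : (PySem.List.sorted daytime (fun x => x)).Perm daytime :=
    PySem.List.sorted_perm _ _ _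
  refine ⟨?_, ?_, ?_⟩
  · have := PySem.List.sorted_pairwise (xs := daytime) (key := fun x => x)
    exact this
  · intro k
    rw [PySem.Dict.getD_counter, hperm.count_eq]
  · intro k
    rw [PySem.Dict.keys_counter, PySem.Set.mem_ofList, List.count_pos_iff]
    exact ⟨fun h => hperm.mem_iff.mpr h, fun h => hperm.mem_iff.mp h⟩

-- ===== VERDICT (by name: the statement is the Claim_ definition above) =====
theorem make_sweets_spec : Claim_equal_make_sweets := by
  intro time sweetness daytime _ _
  unfold Spec_make_sweets make_sweets make_sweets_alt
  have h := loop_eq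
    (PySem.List.sorted2
      ((PySem.List.pyRange 0 (PySem.List.len time) 1).map (fun i =>
        (PySem.List.pyGetD sweetness i 0, PySem.List.pyGetD time i 0)))
      (fun x => -x.1) (fun x => x.2))
    (PySem.Dict.counter daytime) (PySem.List.sorted daytime (fun x => x)) 0 0
    (init_inv daytime)
  simp only []
  rw [h]
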